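-- pv_equiv track=rewrite | github.com/breeze4/indiseek | src/indiseek/tools/resolve_symbol.py | _extract_name_from_scip_symbol
-- ===== SOURCE A (Python) =====
-- def _extract_name_from_scip_symbol(scip_symbol: str) -> str:
--     """Extract a human-readable name from a SCIP symbol string.
--
--     SCIP symbols look like: 'npm . vite 5.0.0 src/`module`/`functionName`().'
--     We extract the last meaningful identifier.
--     """
--     # Remove trailing punctuation
--     s = scip_symbol.rstrip("().")
--     # Find backtick-quoted segments
--     parts = []
--     i = 0
--     while i < len(s):
--         if s[i] == "`":
--             end = s.find("`", i + 1)
--             if end != -1: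
--                 parts.append(s[i + 1 : end])
--                 i = end + 1
--                 continue
--         i += 1
--
--     if parts:
--         return parts[-1]
--
--     # Fallback: use last space-separated segment
--     segments = scip_symbol.split()
--     return segments[-1] if segments else scip_symbol
-- ===== SOURCE B (Python) =====
-- def _extract_name_from_scip_symbol(scip_symbol: str) -> str:
--     """Single forward pass with a tiny state machine: `cur` is None outside
--     backticks, else the characters seen inside the current pair; `last` keeps
--     only the most recently completed segment (no list of parts, no find)."""
--     s = scip_symbol.rstrip("().")
--     last = None
--     cur = None
--     for ch in s:
--         if cur is None:
--             if ch == "`":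
--                 cur = []
--         elif ch == "`":
--             last = "".join(cur)
--             cur = None
--         else:
--             cur.append(ch)
--     if last is not None:
--         return last
--     segments = scip_symbol.split()
--     return segments[-1] if segments else scip_symbol
-- ===== Notes on version B (the rewrite author's own statement) =====
-- stated objective: alternative
-- what changed: Replaces the index-based while-loop that repeatedly calls str.find and accumulates a list of all backtick segments with a single forward-pass state machine that keeps only the current segment and the last completed one (no find calls, no parts list).
import Mathlib
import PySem

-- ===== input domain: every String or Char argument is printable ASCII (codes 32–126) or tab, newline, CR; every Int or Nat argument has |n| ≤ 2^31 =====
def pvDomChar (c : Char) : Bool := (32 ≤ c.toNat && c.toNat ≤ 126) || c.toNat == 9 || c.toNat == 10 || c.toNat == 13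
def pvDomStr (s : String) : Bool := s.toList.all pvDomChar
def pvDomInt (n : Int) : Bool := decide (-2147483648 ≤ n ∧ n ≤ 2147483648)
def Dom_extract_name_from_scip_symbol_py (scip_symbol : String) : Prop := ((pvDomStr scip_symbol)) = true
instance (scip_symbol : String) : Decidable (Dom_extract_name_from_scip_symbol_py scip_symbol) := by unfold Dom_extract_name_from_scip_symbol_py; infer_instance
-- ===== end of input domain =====

-- B replaces A's index-based while-loop (repeated str.find, list of all segments) by a
-- single forward fold with a two-field state machine keeping only the last completed segment.

-- exact port of Python's str.rstrip("()."): drop trailing chars among '(' ')' '.'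
-- (PySem has rstrip for whitespace only, so this is hand-ported; shared by both ports
-- because both Pythons call the same built-in on the same argument)
def pvRstripParen (cs : List Char) : List Char :=
  (cs.reverse.dropWhile (fun c => c == '(' || c == ')' || c == '.')).reverse

-- ===== PORT A =====
-- the while-loop of A: index i, s.find("`", i+1), parts accumulator
def pvALoop (s : List Char) (i : Nat) (parts : List (List Char)) : List (List Char) :=
  if hi : i < s.length then
    if s[i] == '`' then
      let e := PySem.Chars.findFrom s ['`'] ((i + 1 : Nat) : Int)
      if he : e ≠ -1 then
        pvALoop s (e.toNat + 1) (parts ++ [PySem.Chars.slice s (some ((i + 1 : Nat) : Int)) (some e)])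
      else pvALoop s (i + 1) parts
    else pvALoop s (i + 1) parts
  else parts
termination_by s.length - i
decreasing_by
  · have h := (PySem.Chars.findFrom_natCast_spec s ['`'] (i + 1) (by omega) he).1
    omega
  · omega
  · omega

def extract_name_from_scip_symbol_py (scip_symbol : String) : String :=
  let s := pvRstripParen scip_symbol.toList
  let parts := pvALoop s 0 []
  if h : parts ≠ [] then String.mk (parts.getLast h)
  else
    let segments := PySem.Str.split₀ scip_symbol
    if h2 : segments ≠ [] then segments.getLast h2 else scip_symbol

-- ===== PORT B =====
-- one step of B's state machine: state = (last completed segment?, current open segment?)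
def pvStep (st : Option (List Char) × Option (List Char)) (ch : Char) :
    Option (List Char) × Option (List Char) :=
  match st.2 with
  | none => if ch == '`' then (st.1, some []) else (st.1, none)
  | some cur => if ch == '`' then (some cur, none) else (st.1, some (cur ++ [ch]))

def extract_name_from_scip_symbol_py_alt (scip_symbol : String) : String :=
  let s := pvRstripParen scip_symbol.toList
  let r := s.foldl pvStep (none, none)
  match r.1 with
  | some last => String.mk last
  | none =>
    let segments := PySem.Str.split₀ scip_symbol
    if h2 : segments ≠ [] then segments.getLast h2 else scip_symbol

-- ===== PRECONDITION & SPEC =====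
def Spec_extract_name_from_scip_symbol_py (scip_symbol : String) (out : String) : Prop := out = extract_name_from_scip_symbol_py_alt scip_symbol
instance (scip_symbol : String) (out : String) : Decidable (Spec_extract_name_from_scip_symbol_py scip_symbol out) := by unfold Spec_extract_name_from_scip_symbol_py; infer_instance

-- ===== CLAIM (what is proved, stated in full; the proofs are below) =====
def Claim_equal_extract_name_from_scip_symbol_py : Prop := ∀ (scip_symbol : String), Dom_extract_name_from_scip_symbol_py scip_symbol → Spec_extract_name_from_scip_symbol_py scip_symbol (extract_name_from_scip_symbol_py scip_symbol)

-- ===== LEMMAS AND PROOFS =====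

-- reference: the list of greedily paired backtick segments of cs
def pvScan : List Char → List (List Char)
  | [] => []
  | c :: rest =>
    if c = '`' then
      if h : '`' ∈ rest then
        rest.takeWhile (fun x => x != '`') :: pvScan ((rest.dropWhile (fun x => x != '`')).tail)
      else []
    else pvScan rest
termination_by l => l.length
decreasing_by
  · have h1 : (rest.dropWhile (fun x => x != '`')).length ≤ rest.length :=
      List.length_dropWhile_le _ _
    have h2 : rest.dropWhile (fun x => x != '`') ≠ [] := by
      intro hnil
      have := List.dropWhile_eq_nil_iff.mp hnil
      simp at this
      exact absurd rfl (this _ h)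
    have h4 : 0 < (rest.dropWhile (fun x => x != '`')).length := List.length_pos_iff.mpr h2
    simp; omega
  · simp

theorem pvScan_pre {pre l : List Char} (h : '`' ∉ pre) : pvScan (pre ++ l) = pvScan l := by
  induction pre with
  | nil => rfl
  | cons c rest ih =>
    rw [List.cons_append, pvScan]
    have hc : ¬ c = '`' := fun hc => h (hc ▸ List.mem_cons_self)
    simp [hc]
    exact ih (fun hm => h (List.mem_cons_of_mem _ hm))

theorem pvScan_nil_of_not_mem {l : List Char} (h : '`' ∉ l) : pvScan l = [] := by
  have := pvScan_pre (l := []) h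
  simpa [pvScan] using this

theorem pv_fold_none_no {l : List Char} (a : Option (List Char)) (h : '`' ∉ l) :
    List.foldl pvStep (a, none) l = (a, none) := by
  induction l with
  | nil => rfl
  | cons c rest ih =>
    have hc : ¬ c = '`' := fun hc => h (hc ▸ List.mem_cons_self)
    rw [List.foldl_cons]
    have hs : pvStep (a, none) c = (a, none) := by simp [pvStep, hc]
    rw [hs]
    exact ih (fun hm => h (List.mem_cons_of_mem _ hm))

theorem pv_fold_some_no {l : List Char} (a : Option (List Char)) (acc : List Char) (h : '`' ∉ l) :
    List.foldl pvStep (a, some acc) l = (a, some (acc ++ l)) := by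
  induction l generalizing acc with
  | nil => simp
  | cons c rest ih =>
    have hc : ¬ c = '`' := fun hc => h (hc ▸ List.mem_cons_self)
    rw [List.foldl_cons]
    have hs : pvStep (a, some acc) c = (a, some (acc ++ [c])) := by simp [pvStep, hc]
    rw [hs, ih (acc ++ [c]) (fun hm => h (List.mem_cons_of_mem _ hm))]
    simp

theorem pv_not_mem_takeWhile (l : List Char) : '`' ∉ l.takeWhile (fun x => x != '`') := by
  intro hm
  have := List.mem_takeWhile_imp hm
  simp at this

theorem pv_dropWhile_eq_drop (p : Char → Bool) (l : List Char) :
    l.dropWhile p = l.drop (l.takeWhile p).length := by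
  induction l with
  | nil => simp
  | cons a t ih =>
    by_cases hp : p a
    · simp [List.dropWhile_cons, List.takeWhile_cons, hp, ih]
    · simp [List.dropWhile_cons, List.takeWhile_cons, hp]

theorem pv_take_len {c : Char} {l : List Char} (h : c ∈ l) :
    (l.takeWhile (fun x => x != c)).length < l.length := by
  induction l with
  | nil => simp at h
  | cons a t ih =>
    by_cases ha : a = c
    · simp [List.takeWhile_cons, ha]
    · have hct : c ∈ t := (List.mem_cons.mp h).resolve_left (fun h1 => ha h1.symm)
      simp [List.takeWhile_cons, ha]
      exact ih hct

theorem pv_take_get {c : Char} {l : List Char} (h : c ∈ l) :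
    l[(l.takeWhile (fun x => x != c)).length]? = some c := by
  induction l with
  | nil => simp at h
  | cons a t ih =>
    by_cases ha : a = c
    · simp [List.takeWhile_cons, ha]
    · have hct : c ∈ t := (List.mem_cons.mp h).resolve_left (fun h1 => ha h1.symm)
      simp [List.takeWhile_cons, ha]
      exact ih hct

-- decomposition of a list containing a backtick: prefix before the first '`', the '`', the rest

theorem pv_take_before {c : Char} {l : List Char} {i : Nat}
    (h : i < (l.takeWhile (fun x => x != c)).length) : l[i]? ≠ some c := by
  induction l generalizing i with
  | nil => simp at h
  | cons a t ih =>
    by_cases ha : a = c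
    · simp [List.takeWhile_cons, ha] at h
    · simp [List.takeWhile_cons, ha] at h
      cases i with
      | zero => simp; exact fun hc => ha hc
      | succ j => simpa using ih (by omega)

theorem pv_singleton_prefix {c : Char} {m : List Char} : [c] <+: m ↔ m.head? = some c := by
  constructor
  · rintro ⟨t, rfl⟩; rfl
  · intro h; cases m with
    | nil => simp at h
    | cons a t => simp at h; exact ⟨t, by simp [h]⟩

theorem pv_find_not_mem {l : List Char} (h : '`' ∉ l) : PySem.Chars.find l ['`'] = -1 := by
  exact (PySem.Chars.find_eq_neg_one_iff _ _).mpr (fun hinf => h ((List.singleton_infix_iff _ _).mp hinf))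

theorem pv_find_mem {l : List Char} (h : '`' ∈ l) :
    PySem.Chars.find l ['`'] = ((l.takeWhile (fun x => x != '`')).length : Int) := by
  have h0 : 0 ≤ PySem.Chars.find l ['`'] :=
    (PySem.Chars.find_nonneg_iff _ _).mpr ((List.singleton_infix_iff _ _).mpr h)
  obtain ⟨hpre, hmin⟩ := PySem.Chars.find_spec h0
  set j := (PySem.Chars.find l ['`']).toNat with hj
  set t := (l.takeWhile (fun x => x != '`')).length with ht
  have hgetj : l[j]? = some '`' := by
    have := pv_singleton_prefix.mp hpre
    rwa [List.head?_drop] at this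
  have hjt : j = t := by
    rcases Nat.lt_trichotomy j t with hlt | heq | hgt
    · exact absurd hgetj (pv_take_before hlt)
    · exact heq
    · exfalso
      apply hmin t hgt
      rw [pv_singleton_prefix, List.head?_drop]
      exact pv_take_get h
  omega

theorem pv_decomp {l : List Char} (h : '`' ∈ l) :
    l = l.takeWhile (fun x => x != '`') ++
        '`' :: l.drop ((l.takeWhile (fun x => x != '`')).length + 1) ∧
    (l.dropWhile (fun x => x != '`')).tail
      = l.drop ((l.takeWhile (fun x => x != '`')).length + 1) := by
  set t := (l.takeWhile (fun x => x != '`')).length with ht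
  have htl : t < l.length := pv_take_len h
  have hget : l[t] = '`' := by
    have := pv_take_get h
    rw [List.getElem?_eq_getElem htl] at this
    simpa using this
  have hdropc : l.drop t = '`' :: l.drop (t + 1) := by
    rw [List.drop_eq_getElem_cons htl, hget]
  have hdw : l.dropWhile (fun x => x != '`') = l.drop t := pv_dropWhile_eq_drop _ l
  constructor
  · conv_lhs => rw [← List.takeWhile_append_dropWhile (p := fun x => x != '`') (l := l)]
    rw [hdw, hdropc]
  · rw [hdw, hdropc]; rfl

theorem pv_takeWhile_eq_take (p : Char → Bool) (l : List Char) :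
    l.takeWhile p = l.take (l.takeWhile p).length := by
  have h := List.takeWhile_prefix (l := l) (p := p)
  exact List.prefix_iff_eq_take.mp h

theorem pv_fold_aux : ∀ (n : Nat) (l : List Char), l.length ≤ n → ∀ (a : Option (List Char)),
    (List.foldl pvStep (a, none) l).1 = ((pvScan l).getLast?).or a := by
  intro n
  induction n with
  | zero =>
    intro l hl a
    have : l = [] := List.length_eq_zero_iff.mp (Nat.le_zero.mp hl)
    subst this
    simp [pvScan]
  | succ n ih =>
    intro l hl a
    by_cases hmem : '`' ∈ l
    · obtain ⟨hdec, _⟩ := pv_decomp hmem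
      set pre := l.takeWhile (fun x => x != '`') with hpre
      set rest := l.drop (pre.length + 1) with hrest
      have hnp : '`' ∉ pre := pv_not_mem_takeWhile l
      have hlen : pre.length + 1 + rest.length = l.length := by
        rw [hrest]
        have : pre.length + 1 ≤ l.length := pv_take_len hmem
        rw [List.length_drop]; omega
      rw [hdec, List.foldl_append, pv_fold_none_no a hnp, List.foldl_cons]
      have hstep : pvStep (a, none) '`' = (a, some []) := by simp [pvStep]
      rw [hstep, pvScan_pre hnp]
      by_cases hm2 : '`' ∈ rest
      · obtain ⟨hdec2, htail2⟩ := pv_decomp hm2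
        set mid := rest.takeWhile (fun x => x != '`') with hmid
        set tl := rest.drop (mid.length + 1) with htl
        have hnp2 : '`' ∉ mid := pv_not_mem_takeWhile rest
        have hlen2 : mid.length + 1 + tl.length = rest.length := by
          rw [htl]
          have : mid.length + 1 ≤ rest.length := pv_take_len hm2
          rw [List.length_drop]; omega
        have hrhs : pvScan ('`' :: rest) = mid :: pvScan tl := by
          rw [pvScan]; simp [hm2, htail2]; exact hmid.symm
        rw [hrhs, hdec2, List.foldl_append, pv_fold_some_no a [] hnp2, List.foldl_cons]
        have hstep2 : pvStep (a, some ([] ++ mid)) '`' = (some mid, none) := by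
          simp [pvStep]
        rw [hstep2]
        have hih := ih tl (by omega) (some mid)
        rw [hih]
        rw [List.getLast?_cons]
        cases (pvScan tl).getLast? <;> simp
      · rw [pv_fold_some_no a [] hm2]
        rw [pvScan]
        simp [hm2]
    · rw [pv_fold_none_no a hmem, pvScan_nil_of_not_mem hmem]
      simp

theorem pvALoop_aux : ∀ (n : Nat) (s : List Char) (i : Nat) (parts : List (List Char)),
    i ≤ s.length → s.length - i ≤ n →
    pvALoop s i parts = parts ++ pvScan (s.drop i) := by
  intro n
  induction n with
  | zero =>
    intro s i parts hle hn
    have hi : i = s.length := by omega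
    rw [pvALoop]
    simp [hi, pvScan]
  | succ n ih =>
    intro s i parts hle hn
    by_cases hi : i < s.length
    · by_cases hc : s[i] = '`'
      · have hdropi : s.drop i = '`' :: s.drop (i + 1) := by
          rw [List.drop_eq_getElem_cons hi, hc]
        set l := s.drop (i + 1) with hl
        have hll : l.length = s.length - (i + 1) := by rw [hl, List.length_drop]
        have hff := PySem.Chars.findFrom_natCast s ['`'] (i + 1) (by omega)
        by_cases hm : '`' ∈ l
        · set t := (l.takeWhile (fun x => x != '`')).length with htw
          have htlt : t < l.length := pv_take_len hm
          have hfind : PySem.Chars.find l ['`'] = (t : Int) := pv_find_mem hm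
          have hEe : PySem.Chars.findFrom s ['`'] ((i + 1 : Nat) : Int) = ((i + 1 + t : Nat) : Int) := by
            rw [hff, ← hl, hfind]
            have hne' : ((t : Nat) : Int) ≠ -1 := by omega
            rw [if_neg hne']
            push_cast
            ring
          have hne : ((i + 1 + t : Nat) : Int) ≠ -1 := by omega
          have hslice : PySem.Chars.slice s (some ((i + 1 : Nat) : Int)) (some ((i + 1 + t : Nat) : Int))
              = l.takeWhile (fun x => x != '`') := by
            rw [PySem.Chars.slice_eq_listSlice, PySem.List.slice_natCast]
            have : i + 1 + t - (i + 1) = t := by omega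
            rw [this, ← hl, ← pv_takeWhile_eq_take]
          rw [pvALoop]
          simp only [hi, dif_pos, hc, beq_self_eq_true, if_true, hEe, hne, dif_pos,
            Int.toNat_natCast, hslice, ne_eq, not_false_eq_true, ↓reduceDIte]
          have hrec := ih s (i + 1 + t + 1) (parts ++ [l.takeWhile (fun x => x != '`')])
            (by omega) (by omega)
          rw [hrec]
          obtain ⟨_, htail⟩ := pv_decomp hm
          have hdrop2 : s.drop (i + 1 + t + 1) = l.drop (t + 1) := by
            rw [hl, List.drop_drop]
            try congr 1
            try omega
          have hrhs : pvScan (s.drop i) =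
              l.takeWhile (fun x => x != '`') :: pvScan (l.drop (t + 1)) := by
            rw [hdropi, pvScan]
            simp [hm, htail, htw]
          rw [hrhs, hdrop2]
          simp
        · have hfind : PySem.Chars.find l ['`'] = -1 := pv_find_not_mem hm
          have hEe : PySem.Chars.findFrom s ['`'] ((i + 1 : Nat) : Int) = -1 := by
            rw [hff, ← hl, hfind]; simp
          rw [pvALoop]
          simp only [hi, dif_pos, hc, beq_self_eq_true, if_true, hEe, ne_eq,
            not_true_eq_false, not_false_eq_true, ↓reduceDIte]
          have hrec := ih s (i + 1) parts (by omega) (by omega)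
          rw [hrec]
          have h1 : pvScan (s.drop (i + 1)) = [] := pvScan_nil_of_not_mem hm
          have h2 : pvScan (s.drop i) = [] := by
            rw [hdropi, pvScan]; simp [hm]
          try rw [← hl, h1, h2]
      · rw [pvALoop]
        have hcb : (s[i] == '`') = false := by simp [hc]
        simp only [hi, dif_pos, hcb, Bool.false_eq_true, if_false]
        have hrec := ih s (i + 1) parts (by omega) (by omega)
        rw [hrec]
        have hdropi : s.drop i = s[i] :: s.drop (i + 1) := List.drop_eq_getElem_cons hi
        rw [hdropi, pvScan]
        simp [hc]
    · have hieq : i = s.length := by omega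
      rw [pvALoop]
      simp [hieq, pvScan]

theorem pvALoop_eq (s : List Char) (i : Nat) (parts : List (List Char)) (hi : i ≤ s.length) :
    pvALoop s i parts = parts ++ pvScan (s.drop i) :=
  pvALoop_aux (s.length - i) s i parts hi le_rfl

theorem pv_fold_eq (l : List Char) (a : Option (List Char)) :
    (List.foldl pvStep (a, none) l).1 = ((pvScan l).getLast?).or a :=
  pv_fold_aux l.length l le_rfl a

-- ===== VERDICT (by name: the statement is the Claim_ definition above) =====
theorem extract_name_from_scip_symbol_py_spec : Claim_equal_extract_name_from_scip_symbol_py := by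
  intro sym _
  unfold Spec_extract_name_from_scip_symbol_py
  unfold extract_name_from_scip_symbol_py extract_name_from_scip_symbol_py_alt
  have hA := pvALoop_eq (pvRstripParen sym.toList) 0 [] (by omega)
  have hB := pv_fold_eq (pvRstripParen sym.toList) none
  simp only [List.drop_zero, List.nil_append] at hA
  simp only [Option.or_none] at hB
  cases hscan : pvScan (pvRstripParen sym.toList) with
  | nil => simp [hA, hB, hscan]
  | cons p ps =>
    simp only [hA, hB, hscan]
    rw [List.getLast?_eq_some_getLast (l := p :: ps) (by simp)]
    simp
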